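-- pv_equiv track=rewrite | github.com/courseeast-jpg/MedAI | extraction/hybrid_extractor.py | _negation_applies_to
-- ===== SOURCE A (Python) =====
-- def _negation_applies_to(sentence: str, entity: str) -> bool:
--     # Guard against "no fever, has chest pain" — negation stops at a comma
--     # or conjunction that precedes the entity.
--     idx = sentence.lower().find(entity.lower())
--     if idx == -1:
--         return False
--     before = sentence[:idx].lower()
--     last_cue = max(
--         (before.rfind(cue) for cue in ("no ", "denies", "denied", "without",
--                                        "ruled out", "negative for", "absent", "excluded")),
--         default=-1,
--     )
--     if last_cue == -1:
--         return False
--     boundary = max(before.rfind(","), before.rfind(";"),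
--                    before.rfind(" but "), before.rfind(" however "))
--     return last_cue > boundary
-- ===== SOURCE B (Python) =====
-- def _negation_applies_to(sentence: str, entity: str) -> bool:
--     # Single forward state-machine scan: walk the prefix before the entity once,
--     # switching a "negated" flag on when a cue starts at the current position and
--     # off when a clause boundary starts there; no rfind / position maxima at all.
--     lowered = sentence.lower()
--     idx = lowered.find(entity.lower())
--     if idx == -1:
--         return False
--     before = lowered[:idx]
--     cues = ("no ", "denies", "denied", "without", "ruled out",
--             "negative for", "absent", "excluded")
--     boundaries = (",", ";", " but ", " however ")
--     negated = False
--     for i in range(len(before)):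
--         tail = before[i:]
--         if any(tail.startswith(b) for b in boundaries):
--             negated = False
--         elif any(tail.startswith(c) for c in cues):
--             negated = True
--     return negated
-- ===== Notes on version B (the rewrite author's own statement) =====
-- stated objective: alternative
-- what changed: B replaces A's per-cue backwards rfind maxima and position comparison by a single forward state-machine scan of the prefix before the entity, toggling a negated flag on at each cue start and off at each boundary start.
import Mathlib
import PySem

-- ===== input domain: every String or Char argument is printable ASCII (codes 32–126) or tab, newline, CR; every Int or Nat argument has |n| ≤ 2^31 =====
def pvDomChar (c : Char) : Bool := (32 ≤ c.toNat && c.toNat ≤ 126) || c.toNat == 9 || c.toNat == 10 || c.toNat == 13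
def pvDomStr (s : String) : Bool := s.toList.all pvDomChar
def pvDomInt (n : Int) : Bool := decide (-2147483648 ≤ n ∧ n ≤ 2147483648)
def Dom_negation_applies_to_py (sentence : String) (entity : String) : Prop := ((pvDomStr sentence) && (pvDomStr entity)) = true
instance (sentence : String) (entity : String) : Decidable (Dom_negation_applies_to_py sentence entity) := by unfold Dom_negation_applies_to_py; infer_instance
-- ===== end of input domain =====

-- B replaces A's backwards rfind maxima by a single forward state-machine scan of the
-- prefix before the entity: a "negated" flag is switched on at each cue start and off
-- at each clause-boundary start (different algorithm, same cost; objective: alternative).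

-- ===== PORT A =====
def negation_applies_to_py (sentence : String) (entity : String) : Bool :=
  let idx := PySem.Chars.find (PySem.Chars.lower sentence.toList) (PySem.Chars.lower entity.toList)
  if idx = -1 then false
  else
    let before := PySem.Chars.lower (PySem.List.slice sentence.toList none (some idx))
    let last_cue := PySem.List.maxD
      (["no ", "denies", "denied", "without", "ruled out", "negative for", "absent", "excluded"].map
        (fun cue => PySem.Chars.rfind before cue.toList)) (fun x => x) (-1)
    if last_cue = -1 then false
    else
      let boundary := max (max (max (PySem.Chars.rfind before ",".toList)
        (PySem.Chars.rfind before ";".toList)) (PySem.Chars.rfind before " but ".toList))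
        (PySem.Chars.rfind before " however ".toList)
      decide (boundary < last_cue)

-- ===== PORT B =====
def negation_applies_to_py_alt (sentence : String) (entity : String) : Bool :=
  let lowered := PySem.Chars.lower sentence.toList
  let idx := PySem.Chars.find lowered (PySem.Chars.lower entity.toList)
  if idx = -1 then false
  else
    let before := PySem.List.slice lowered none (some idx)
    let cues : List (List Char) := ["no ".toList, "denies".toList, "denied".toList, "without".toList,
      "ruled out".toList, "negative for".toList, "absent".toList, "excluded".toList]
    let boundaries : List (List Char) := [",".toList, ";".toList, " but ".toList, " however ".toList]
    (PySem.List.pyRange 0 (before.length : Int)).foldl (fun negated i =>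
      let tail := PySem.List.slice before (some i) none
      if boundaries.any (fun b => PySem.Chars.startswith tail b) then false
      else if cues.any (fun c => PySem.Chars.startswith tail c) then true
      else negated) false

-- ===== PRECONDITION & SPEC =====
def Spec_negation_applies_to_py (sentence : String) (entity : String) (out : Bool) : Prop := out = negation_applies_to_py_alt sentence entity
instance (sentence : String) (entity : String) (out : Bool) : Decidable (Spec_negation_applies_to_py sentence entity out) := by unfold Spec_negation_applies_to_py; infer_instance

-- ===== CLAIM (what is proved, stated in full; the proofs are below) =====
def Claim_equal_negation_applies_to_py : Prop := ∀ (sentence : String) (entity : String), Dom_negation_applies_to_py sentence entity → Spec_negation_applies_to_py sentence entity (negation_applies_to_py sentence entity)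

-- ===== LEMMAS AND PROOFS =====

lemma go_neg_one_le (s sub : List Char) (k : Nat) : -1 ≤ PySem.Chars.rfind.go s sub k := by
  induction k with
  | zero => simp [PySem.Chars.rfind.go]; split <;> simp
  | succ k ih =>
    simp only [PySem.Chars.rfind.go]
    split
    · push_cast; omega
    · exact ih

-- characterisation of rfind's scan: the result is ≥ m iff sub occurs at some start j with m ≤ j ≤ k
lemma go_ge_iff (s sub : List Char) (k m : Nat) :
    ((m : Int) ≤ PySem.Chars.rfind.go s sub k) ↔ ∃ j, m ≤ j ∧ j ≤ k ∧ sub <+: s.drop j := by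
  induction k with
  | zero =>
    simp only [PySem.Chars.rfind.go]
    split
    · rename_i h
      rw [List.isPrefixOf_iff_prefix] at h
      constructor
      · intro hm
        exact ⟨0, by omega, le_refl 0, by simpa using h⟩
      · rintro ⟨j, hmj, hj0, _⟩; omega
    · rename_i h
      rw [List.isPrefixOf_iff_prefix] at h
      constructor
      · intro hm; omega
      · rintro ⟨j, hmj, hj0, hp⟩
        interval_cases j
        simp at hp
        exact absurd hp h
  | succ k ih =>
    simp only [PySem.Chars.rfind.go]
    split
    · rename_i h
      rw [List.isPrefixOf_iff_prefix] at h
      constructor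
      · intro hm
        exact ⟨k + 1, by exact_mod_cast hm, le_refl _, h⟩
      · rintro ⟨j, hmj, hjk, _⟩
        push_cast; omega
    · rename_i h
      rw [List.isPrefixOf_iff_prefix] at h
      rw [ih]
      constructor
      · rintro ⟨j, hmj, hjk, hp⟩; exact ⟨j, hmj, by omega, hp⟩
      · rintro ⟨j, hmj, hjk, hp⟩
        refine ⟨j, hmj, ?_, hp⟩
        rcases Nat.lt_or_ge j (k + 1) with hlt | hge
        · omega
        · have : j = k + 1 := by omega
          subst this; exact absurd hp h

lemma rfind_neg_one_le (s sub : List Char) : -1 ≤ PySem.Chars.rfind s sub :=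
  go_neg_one_le s sub s.length

lemma rfind_ge_iff (s sub : List Char) (m : Nat) :
    ((m : Int) ≤ PySem.Chars.rfind s sub) ↔ ∃ j, m ≤ j ∧ j ≤ s.length ∧ sub <+: s.drop j :=
  go_ge_iff s sub s.length m

lemma pv_decide_congr {p q : Prop} [Decidable p] [Decidable q] (h : p ↔ q) :
    decide p = decide q := by simp [h]

-- A's lowercasing of the prefix equals taking the prefix of the lowercased sentence
lemma lower_take (xs : List Char) (n : Nat) :
    PySem.Chars.lower (List.take n xs) = List.take n (PySem.Chars.lower xs) := by
  simp [PySem.Chars.lower, List.map_take]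

lemma foldl_max_mem {α : Type} [LinearOrder α] (t : List α) (a : α) :
    List.foldl max a t = a ∨ List.foldl max a t ∈ t := by
  induction t generalizing a with
  | nil => left; rfl
  | cons x t ih =>
    simp only [List.foldl, List.mem_cons]
    rcases ih (max a x) with h | h
    · rcases max_choice a x with hm | hm
      · left; rw [h, hm]
      · right; left; rw [h, hm]
    · right; right; exact h

-- B's forward scan computes: "some cue starts at j and no boundary starts at any k ∈ [j, n)"
lemma scan_eq (s : List Char) (C B : List (List Char)) (n : Nat) :
    ((List.range n).foldl (fun negated k =>
      if B.any (fun b => PySem.Chars.startswith (s.drop k) b) then false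
      else if C.any (fun c => PySem.Chars.startswith (s.drop k) c) then true
      else negated) false)
    = decide (∃ j, j < n ∧ (∃ c ∈ C, c <+: s.drop j) ∧
        ∀ k, j ≤ k → k < n → ¬ ∃ b ∈ B, b <+: s.drop k) := by
  induction n with
  | zero => simp
  | succ n ih =>
    rw [List.range_succ, List.foldl_append, List.foldl_cons, List.foldl_nil, ih]
    have hbIff : (B.any (fun b => PySem.Chars.startswith (s.drop n) b) = true) ↔
        (∃ b ∈ B, b <+: s.drop n) := by
      simp [List.any_eq_true, PySem.Chars.startswith_iff]
    have hcIff : (C.any (fun c => PySem.Chars.startswith (s.drop n) c) = true) ↔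
        (∃ c ∈ C, c <+: s.drop n) := by
      simp [List.any_eq_true, PySem.Chars.startswith_iff]
    by_cases hb : ∃ b ∈ B, b <+: s.drop n
    · rw [if_pos (hbIff.mpr hb)]
      symm
      rw [decide_eq_false_iff_not]
      rintro ⟨j, hj, _, hall⟩
      exact hall n (by omega) (by omega) hb
    · rw [if_neg (fun h => hb (hbIff.mp h))]
      by_cases hc : ∃ c ∈ C, c <+: s.drop n
      · rw [if_pos (hcIff.mpr hc)]
        symm
        rw [decide_eq_true_iff]
        exact ⟨n, by omega, hc, fun k hk1 hk2 => by
          have : k = n := by omega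
          subst this; exact hb⟩
      · rw [if_neg (fun h => hc (hcIff.mp h))]
        apply pv_decide_congr
        constructor
        · rintro ⟨j, hj, hcj, hall⟩
          refine ⟨j, by omega, hcj, fun k hk1 hk2 => ?_⟩
          rcases Nat.lt_or_ge k n with h | h
          · exact hall k hk1 h
          · have : k = n := by omega
            subst this; exact hb
        · rintro ⟨j, hj, hcj, hall⟩
          have hjn : j ≠ n := fun h => hc (h ▸ hcj)
          exact ⟨j, by omega, hcj, fun k hk1 hk2 => hall k hk1 (by omega)⟩

-- the crux: "last cue after last boundary" = "some cue with no boundary between it and the end"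
lemma crux (s : List Char) (C B : List (List Char))
    (hC : ∀ c ∈ C, c ≠ []) (hB : ∀ b ∈ B, b ≠ [])
    (bd lc : Int) (hbd1 : -1 ≤ bd)
    (hbd2 : ∀ b ∈ B, PySem.Chars.rfind s b ≤ bd)
    (hbd3 : bd = -1 ∨ ∃ b ∈ B, bd = PySem.Chars.rfind s b)
    (hlc2 : ∀ c ∈ C, PySem.Chars.rfind s c ≤ lc)
    (hlc3 : lc = -1 ∨ ∃ c ∈ C, lc = PySem.Chars.rfind s c) :
    (bd < lc) ↔ ∃ j, j < s.length ∧ (∃ c ∈ C, c <+: s.drop j) ∧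
      ∀ k, j ≤ k → k < s.length → ¬ ∃ b ∈ B, b <+: s.drop k := by
  constructor
  · intro h
    have hlc0 : 0 ≤ lc := by omega
    rcases hlc3 with h1 | ⟨c₀, hcm, hlceq⟩
    · omega
    · have : (lc.toNat : Int) ≤ PySem.Chars.rfind s c₀ := by omega
      rw [rfind_ge_iff] at this
      obtain ⟨j, hmj, hjL, hp⟩ := this
      have hjlt : j < s.length := by
        rcases Nat.lt_or_ge j s.length with h' | h'
        · exact h'
        · have : j = s.length := by omega
          subst this
          rw [List.drop_length, List.prefix_nil] at hp
          exact absurd hp (hC c₀ hcm)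
      refine ⟨j, hjlt, ⟨c₀, hcm, hp⟩, ?_⟩
      rintro k hjk hkL ⟨b₀, hbm, hpb⟩
      have hk : (k : Int) ≤ PySem.Chars.rfind s b₀ := by
        rw [rfind_ge_iff]; exact ⟨k, le_refl k, by omega, hpb⟩
      have := hbd2 b₀ hbm
      omega
  · rintro ⟨j, hjL, ⟨c₀, hcm, hp⟩, hall⟩
    have hjc : (j : Int) ≤ PySem.Chars.rfind s c₀ := by
      rw [rfind_ge_iff]; exact ⟨j, le_refl j, by omega, hp⟩
    have hjlc : (j : Int) ≤ lc := le_trans hjc (hlc2 c₀ hcm)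
    by_contra hcon
    have hbdj : (j : Int) ≤ bd := by omega
    rcases hbd3 with h1 | ⟨b₀, hbm, hbdeq⟩
    · omega
    · have : (bd.toNat : Int) ≤ PySem.Chars.rfind s b₀ := by omega
      rw [rfind_ge_iff] at this
      obtain ⟨k, hmk, hkL, hpb⟩ := this
      have hklt : k < s.length := by
        rcases Nat.lt_or_ge k s.length with h' | h'
        · exact h'
        · have : k = s.length := by omega
          subst this
          rw [List.drop_length, List.prefix_nil] at hpb
          exact absurd hpb (hB b₀ hbm)
      exact hall k (by omega) hklt ⟨b₀, hbm, hpb⟩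

-- ===== VERDICT (by name: the statement is the Claim_ definition above) =====
theorem negation_applies_to_py_spec : Claim_equal_negation_applies_to_py := by
  intro sentence entity _
  unfold Spec_negation_applies_to_py negation_applies_to_py negation_applies_to_py_alt
  simp only []
  set idx := PySem.Chars.find (PySem.Chars.lower sentence.toList) (PySem.Chars.lower entity.toList) with hidx
  by_cases h : idx = -1
  · simp [h]
  · simp only [h, if_false]
    have hidx0 : 0 ≤ idx := by
      have := PySem.Chars.neg_one_le_find (PySem.Chars.lower sentence.toList) (PySem.Chars.lower entity.toList)
      rw [← hidx] at this; omega
    -- the two `before`s coincide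
    have hbefore : PySem.Chars.lower (PySem.List.slice sentence.toList none (some idx))
        = PySem.List.slice (PySem.Chars.lower sentence.toList) none (some idx) := by
      rw [PySem.List.slice_to _ hidx0, PySem.List.slice_to _ hidx0, lower_take]
    rw [hbefore]
    set before := PySem.List.slice (PySem.Chars.lower sentence.toList) none (some idx) with hbef
    -- name A's two extremal positions
    set lc := PySem.List.maxD
      (["no ", "denies", "denied", "without", "ruled out", "negative for", "absent", "excluded"].map
        (fun cue => PySem.Chars.rfind before cue.toList)) (fun x => x) (-1) with hlcdef
    set bd := max (max (max (PySem.Chars.rfind before ",".toList)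
      (PySem.Chars.rfind before ";".toList)) (PySem.Chars.rfind before " but ".toList))
      (PySem.Chars.rfind before " however ".toList) with hbddef
    -- B's scan, rewritten over List.range with Nat indices
    have hscan : (PySem.List.pyRange 0 (before.length : Int)).foldl (fun negated i =>
        if [",".toList, ";".toList, " but ".toList, " however ".toList].any
            (fun b => PySem.Chars.startswith (PySem.List.slice before (some i) none) b) then false
        else if ["no ".toList, "denies".toList, "denied".toList, "without".toList,
            "ruled out".toList, "negative for".toList, "absent".toList, "excluded".toList].any
            (fun c => PySem.Chars.startswith (PySem.List.slice before (some i) none) c) then true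
        else negated) false
        = decide (∃ j, j < before.length ∧
            (∃ c ∈ [ "no ".toList, "denies".toList, "denied".toList, "without".toList,
              "ruled out".toList, "negative for".toList, "absent".toList, "excluded".toList], c <+: before.drop j) ∧
            ∀ k, j ≤ k → k < before.length →
              ¬ ∃ b ∈ [",".toList, ";".toList, " but ".toList, " however ".toList], b <+: before.drop k) := by
      rw [PySem.List.pyRange_zero_natCast, List.foldl_map]
      simp only [PySem.List.slice_from_natCast]
      exact scan_eq before _ _ before.length
    -- lc expanded as a fold of max over the eight rfind values
    rw [List.map_cons, List.map_cons, List.map_cons, List.map_cons, List.map_cons,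
      List.map_cons, List.map_cons, List.map_cons, List.map_nil, PySem.List.maxD,
      PySem.List.max?_id_cons, Option.getD_some] at hlcdef
    have hlc2 : ∀ c ∈ ["no ".toList, "denies".toList, "denied".toList, "without".toList,
        "ruled out".toList, "negative for".toList, "absent".toList, "excluded".toList],
        PySem.Chars.rfind before c ≤ lc := by
      intro c hc
      rw [hlcdef]
      fin_cases hc
      · exact (PySem.List.le_foldl_max _ _).1
      all_goals exact (PySem.List.le_foldl_max _ _).2 _ (by simp)
    have hlc3 : lc = -1 ∨ ∃ c ∈ ["no ".toList, "denies".toList, "denied".toList, "without".toList,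
        "ruled out".toList, "negative for".toList, "absent".toList, "excluded".toList],
        lc = PySem.Chars.rfind before c := by
      right
      rcases foldl_max_mem [PySem.Chars.rfind before "denies".toList, PySem.Chars.rfind before "denied".toList,
        PySem.Chars.rfind before "without".toList, PySem.Chars.rfind before "ruled out".toList,
        PySem.Chars.rfind before "negative for".toList, PySem.Chars.rfind before "absent".toList,
        PySem.Chars.rfind before "excluded".toList] (PySem.Chars.rfind before "no ".toList) with h' | h'
      · exact ⟨"no ".toList, by simp, by rw [hlcdef, h']⟩
      · simp only [List.mem_cons, List.not_mem_nil, or_false] at h'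
        rcases h' with h' | h' | h' | h' | h' | h' | h'
        · exact ⟨"denies".toList, by simp, by rw [hlcdef, h']⟩
        · exact ⟨"denied".toList, by simp, by rw [hlcdef, h']⟩
        · exact ⟨"without".toList, by simp, by rw [hlcdef, h']⟩
        · exact ⟨"ruled out".toList, by simp, by rw [hlcdef, h']⟩
        · exact ⟨"negative for".toList, by simp, by rw [hlcdef, h']⟩
        · exact ⟨"absent".toList, by simp, by rw [hlcdef, h']⟩
        · exact ⟨"excluded".toList, by simp, by rw [hlcdef, h']⟩
    have hbd1 : -1 ≤ bd := le_trans (rfind_neg_one_le before ",".toList)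
      (le_max_of_le_left (le_max_of_le_left (le_max_left _ _)))
    have hbd2 : ∀ b ∈ [",".toList, ";".toList, " but ".toList, " however ".toList],
        PySem.Chars.rfind before b ≤ bd := by
      intro b hb
      rw [hbddef]
      fin_cases hb
      · exact le_max_of_le_left (le_max_of_le_left (le_max_left _ _))
      · exact le_max_of_le_left (le_max_of_le_left (le_max_right _ _))
      · exact le_max_of_le_left (le_max_right _ _)
      · exact le_max_right _ _
    have hbd3 : bd = -1 ∨ ∃ b ∈ [",".toList, ";".toList, " but ".toList, " however ".toList],
        bd = PySem.Chars.rfind before b := by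
      right
      rw [hbddef]
      rcases max_choice (max (max (PySem.Chars.rfind before ",".toList)
        (PySem.Chars.rfind before ";".toList)) (PySem.Chars.rfind before " but ".toList))
        (PySem.Chars.rfind before " however ".toList) with h' | h'
      · rw [h']
        rcases max_choice (max (PySem.Chars.rfind before ",".toList)
          (PySem.Chars.rfind before ";".toList)) (PySem.Chars.rfind before " but ".toList) with h'' | h''
        · rw [h'']
          rcases max_choice (PySem.Chars.rfind before ",".toList)
            (PySem.Chars.rfind before ";".toList) with h3 | h3
          · exact ⟨",".toList, by simp, h3⟩
          · exact ⟨";".toList, by simp, h3⟩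
        · exact ⟨" but ".toList, by simp, h''⟩
      · exact ⟨" however ".toList, by simp, h'⟩
    have hkey := crux before
      ["no ".toList, "denies".toList, "denied".toList, "without".toList,
        "ruled out".toList, "negative for".toList, "absent".toList, "excluded".toList]
      [",".toList, ";".toList, " but ".toList, " however ".toList]
      (by intro c hc; fin_cases hc <;> decide) (by intro b hb; fin_cases hb <;> decide)
      bd lc hbd1 hbd2 hbd3 hlc2 hlc3
    rw [hscan]
    split
    · -- A's early return: no cue occurs at all, so bd < lc is impossible and the scan is false too
      rename_i hlc
      symm
      rw [decide_eq_false_iff_not, ← hkey]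
      omega
    · exact pv_decide_congr hkey
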